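-- pv_equiv track=rewrite | github.com/MetaStark/vision-IoS | 03_FUNCTIONS/aci_triangle_shadow.py | is_crypto_asset
-- ===== SOURCE A (Python) =====
-- from typing import Dict, List, Optional, Tuple
--
-- CRYPTO_ASSETS = {
--     'BTC', 'ETH', 'SOL', 'DOGE', 'XRP', 'ADA', 'AVAX', 'DOT', 'MATIC', 'LINK',
--     'BTC-USD', 'ETH-USD', 'SOL-USD', 'BTCUSDT', 'ETHUSDT', 'SOLUSDT',
--     'BTC/USD', 'ETH/USD', 'SOL/USD'
-- }
--
-- def is_crypto_asset(needle: Dict) -> bool: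
--     """Check if needle is for a crypto asset."""
--     price_witness = needle.get('price_witness_symbol', '') or ''
--     target_asset = needle.get('target_asset', '') or ''
--     hypothesis_category = needle.get('hypothesis_category', '') or ''
--
--     # Check various fields for crypto indicators
--     check_fields = [price_witness.upper(), target_asset.upper(), hypothesis_category.upper()]
--
--     for field in check_fields:
--         if any(crypto in field for crypto in CRYPTO_ASSETS):
--             return True
--         if 'CRYPTO' in field or 'BITCOIN' in field or 'ETHEREUM' in field:
--             return True
--
--     return False
-- ===== SOURCE B (Python) =====
-- CRYPTO_ASSETS = {
--     'BTC', 'ETH', 'SOL', 'DOGE', 'XRP', 'ADA', 'AVAX', 'DOT', 'MATIC', 'LINK',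
--     'BTC-USD', 'ETH-USD', 'SOL-USD', 'BTCUSDT', 'ETHUSDT', 'SOLUSDT',
--     'BTC/USD', 'ETH/USD', 'SOL/USD'
-- }
--
-- _TOKENS = CRYPTO_ASSETS | {'CRYPTO', 'BITCOIN', 'ETHEREUM'}
-- _LENGTHS = sorted({len(t) for t in _TOKENS})
--
-- def is_crypto_asset(needle):
--     """Check if needle is for a crypto asset."""
--     for key in ('price_witness_symbol', 'target_asset', 'hypothesis_category'):
--         field = (needle.get(key, '') or '').upper()
--         n = len(field)
--         for i in range(n):
--             for size in _LENGTHS: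
--                 if i + size <= n and field[i:i+size] in _TOKENS:
--                     return True
--     return False
-- ===== Notes on version B (the rewrite author's own statement) =====
-- stated objective: alternative
-- what changed: A searches token-outer: for each field it asks whether any of the 22 tokens occurs as a substring via `in`; B searches window-outer: it slides over each field's positions and looks each window field[i:i+L] (L ranging over the distinct token lengths) up in a hash set of tokens, so the per-token substring scans disappear in favour of O(1) set lookups of windows.
import Mathlib
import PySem

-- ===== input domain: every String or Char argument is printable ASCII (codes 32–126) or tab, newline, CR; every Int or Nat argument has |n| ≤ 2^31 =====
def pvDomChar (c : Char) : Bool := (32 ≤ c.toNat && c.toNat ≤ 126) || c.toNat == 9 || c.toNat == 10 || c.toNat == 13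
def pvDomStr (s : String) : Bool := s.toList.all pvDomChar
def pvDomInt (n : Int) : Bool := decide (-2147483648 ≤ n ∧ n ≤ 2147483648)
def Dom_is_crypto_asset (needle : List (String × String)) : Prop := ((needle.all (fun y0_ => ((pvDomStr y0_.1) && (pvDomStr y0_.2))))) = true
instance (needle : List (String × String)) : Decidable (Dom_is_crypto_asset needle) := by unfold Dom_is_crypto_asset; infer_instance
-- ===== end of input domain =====

-- B inverts the search direction: instead of A's token-outer substring tests ('crypto in field'
-- for each token), B slides window-outer over each field's positions and looks each window
-- field[i:i+L] (L over the distinct token lengths) up in a set of tokens; objective: alternative.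

-- ===== PORT A =====
-- module-level set literal CRYPTO_ASSETS
def cryptoAssets : PySem.Set String := PySem.Set.ofList
  ["BTC", "ETH", "SOL", "DOGE", "XRP", "ADA", "AVAX", "DOT", "MATIC", "LINK",
   "BTC-USD", "ETH-USD", "SOL-USD", "BTCUSDT", "ETHUSDT", "SOLUSDT",
   "BTC/USD", "ETH/USD", "SOL/USD"]

-- `s or ''` on a string: s if non-empty ('truthy'), else '' (either way the value s)
def orEmpty (s : String) : String := if s == "" then s else s

-- the `for field in check_fields:` loop with its two `return True` branches
def aCheckLoop : List String → Bool
  | [] => false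
  | field :: rest =>
    if cryptoAssets.any (fun crypto => PySem.Str.isIn crypto field) then true
    else if PySem.Str.isIn "CRYPTO" field || PySem.Str.isIn "BITCOIN" field || PySem.Str.isIn "ETHEREUM" field then true
    else aCheckLoop rest

def is_crypto_asset (needle : List (String × String)) : Bool :=
  let price_witness := orEmpty (PySem.Dict.getD (PySem.Dict.mk needle) "price_witness_symbol" "")
  let target_asset := orEmpty (PySem.Dict.getD (PySem.Dict.mk needle) "target_asset" "")
  let hypothesis_category := orEmpty (PySem.Dict.getD (PySem.Dict.mk needle) "hypothesis_category" "")
  let check_fields := [PySem.Str.upper price_witness, PySem.Str.upper target_asset, PySem.Str.upper hypothesis_category]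
  aCheckLoop check_fields

-- ===== PORT B =====
-- _TOKENS = CRYPTO_ASSETS | {'CRYPTO', 'BITCOIN', 'ETHEREUM'}
def bTokens : PySem.Set String := PySem.Set.union cryptoAssets ["CRYPTO", "BITCOIN", "ETHEREUM"]

-- _LENGTHS = sorted({len(t) for t in _TOKENS})
def bLengths : List Int :=
  PySem.List.sorted (PySem.Set.ofList ((bTokens : List String).map (fun t => (PySem.Str.len t : Int)))) (fun x => x) false

-- the two inner loops `for i in range(n): for size in _LENGTHS: if …: return True`
def bFieldScan (field : String) : Bool :=
  let n : Int := (PySem.Str.len field : Int)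
  (PySem.List.pyRange 0 n 1).any (fun i =>
    bLengths.any (fun size =>
      decide (i + size ≤ n) && PySem.Set.contains bTokens (PySem.Str.slice field (some i) (some (i + size)))))

def bKeys : List String := ["price_witness_symbol", "target_asset", "hypothesis_category"]

def is_crypto_asset_alt (needle : List (String × String)) : Bool :=
  bKeys.any (fun k => bFieldScan (PySem.Str.upper (orEmpty (PySem.Dict.getD (PySem.Dict.mk needle) k ""))))

-- ===== PRECONDITION & SPEC =====
def Spec_is_crypto_asset (needle : List (String × String)) (out : Bool) : Prop := out = is_crypto_asset_alt needle
instance (needle : List (String × String)) (out : Bool) : Decidable (Spec_is_crypto_asset needle out) := by unfold Spec_is_crypto_asset; infer_instance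

-- ===== CLAIM (what is proved, stated in full; the proofs are below) =====
def Claim_equal_is_crypto_asset : Prop := ∀ (needle : List (String × String)), Dom_is_crypto_asset needle → Spec_is_crypto_asset needle (is_crypto_asset needle)

-- ===== LEMMAS AND PROOFS =====

-- the per-field test A performs (both early-return checks combined)
def checkField (f : String) : Bool :=
  cryptoAssets.any (fun crypto => PySem.Str.isIn crypto f)
    || (PySem.Str.isIn "CRYPTO" f || PySem.Str.isIn "BITCOIN" f || PySem.Str.isIn "ETHEREUM" f)

lemma aCheckLoop_eq_any (fs : List String) : aCheckLoop fs = fs.any checkField := by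
  induction fs with
  | nil => rfl
  | cons f rest ih =>
    show (if _ then _ else _) = _
    rw [List.any_cons]
    unfold checkField
    split_ifs with h1 h2
    · rw [h1]; simp only [Bool.true_or]
    · rw [h2]; simp only [Bool.or_true, Bool.true_or]
    · simp only [Bool.not_eq_true] at h1 h2
      rw [h1, h2, ih]; simp only [Bool.false_or]; rfl

lemma tokens_split : (bTokens : List String) = cryptoAssets ++ ["CRYPTO", "BITCOIN", "ETHEREUM"] := by decide

lemma lengths_eq : bLengths = [3, 4, 5, 6, 7, 8] := by decide

lemma checkField_eq_anyTokens (f : String) :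
    checkField f = (bTokens : List String).any (fun tok => PySem.Str.isIn tok f) := by
  rw [tokens_split, List.any_append]
  simp only [checkField, List.any_cons, List.any_nil, Bool.or_false, Bool.or_assoc]

lemma set_contains_iff (s : PySem.Set String) (x : String) :
    PySem.Set.contains s x = true ↔ x ∈ s := by
  simp [PySem.Set.contains]

-- a window of f equals tok (for some admissible position/length) iff tok occurs in f
lemma window_iff_infix (f tok : String) (htok : tok ∈ (bTokens : List String)) :
    (∃ i ∈ PySem.List.pyRange 0 ((PySem.Str.len f : Int)) 1, ∃ size ∈ bLengths,
        i + size ≤ (PySem.Str.len f : Int) ∧ PySem.Str.slice f (some i) (some (i + size)) = tok)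
      ↔ PySem.Str.isIn tok f = true := by
  have hn : (PySem.Str.len f : Int) = (f.toList.length : Int) := by simp [PySem.Str.len_eq]
  constructor
  · rintro ⟨i, hi, size, hsize, hle, hslice⟩
    obtain ⟨h0i, _⟩ := (PySem.List.mem_pyRange_one).1 hi
    have h0s : (0 : Int) ≤ size := by
      rw [lengths_eq] at hsize
      simp only [List.mem_cons, List.not_mem_nil, or_false] at hsize
      omega
    have hslice' := congrArg String.toList hslice
    rw [PySem.Str.toList_slice, PySem.Chars.slice_eq_listSlice, PySem.List.slice_toNat _ h0i (by omega)] at hslice'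
    rw [PySem.Str.isIn_iff_infix, ← hslice']
    exact ((List.take_prefix _ _).isInfix).trans (List.drop_suffix _ _).isInfix
  · intro hin
    rw [PySem.Str.isIn_iff_infix] at hin
    obtain ⟨p, q, hpq⟩ := hin
    have hall : ∀ t ∈ (bTokens : List String),
        ((PySem.Str.len t : Int)) ∈ bLengths ∧ 3 ≤ PySem.Str.len t := by decide
    obtain ⟨hmemlen, h3⟩ := hall tok htok
    have hlen' : PySem.Str.len tok = tok.toList.length := by simp [PySem.Str.len_eq]
    have hflen : f.toList.length = p.length + (tok.toList.length + q.length) := by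
      rw [← hpq]; simp [List.length_append]
    refine ⟨(p.length : Int), ?_, (PySem.Str.len tok : Int), hmemlen, ?_, ?_⟩
    · exact (PySem.List.mem_pyRange_one).2 ⟨by omega, by rw [hn]; omega⟩
    · rw [hn, hlen']; omega
    · apply String.toList_inj.mp
      rw [PySem.Str.toList_slice, PySem.Chars.slice_eq_listSlice, hlen']
      rw [PySem.List.slice_natCast_add, ← hpq, List.append_assoc, List.drop_left, List.take_left]

lemma fieldScan_eq (f : String) : bFieldScan f = checkField f := by
  rw [checkField_eq_anyTokens, Bool.eq_iff_iff]
  unfold bFieldScan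
  simp only [List.any_eq_true]
  constructor
  · rintro ⟨i, hi, size, hsize, hcond⟩
    rw [Bool.and_eq_true, decide_eq_true_iff] at hcond
    obtain ⟨hle, hcont⟩ := hcond
    have htok := (set_contains_iff _ _).1 hcont
    exact ⟨_, htok, (window_iff_infix f _ htok).1 ⟨i, hi, size, hsize, hle, rfl⟩⟩
  · rintro ⟨tok, htok, hin⟩
    obtain ⟨i, hi, size, hsize, hle, hslice⟩ := (window_iff_infix f tok htok).2 hin
    refine ⟨i, hi, size, hsize, ?_⟩
    rw [Bool.and_eq_true, decide_eq_true_iff]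
    exact ⟨hle, by rw [hslice]; exact (set_contains_iff _ _).2 htok⟩

-- ===== VERDICT (by name: the statement is the Claim_ definition above) =====
theorem is_crypto_asset_spec : Claim_equal_is_crypto_asset := by
  intro needle _
  unfold Spec_is_crypto_asset is_crypto_asset is_crypto_asset_alt bKeys
  rw [aCheckLoop_eq_any]
  simp only [List.any_cons, List.any_nil, fieldScan_eq, Bool.or_false]
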